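-- pv_equiv track=rewrite | github.com/Metaculus/metac-bot-template | tools/context_pack.py | build_codemap
-- ===== SOURCE A (Python) =====
-- from typing import Dict, Iterable, List, Sequence, Tuple
--
-- def build_tree(paths: Sequence[str]) -> str:
--     """Create a textual tree representation from paths."""
--
--     tree: Dict[str, Dict] = {}
--     for path in paths:
--         parts = path.split("/")
--         node = tree
--         for part in parts[:-1]:
--             node = node.setdefault(part, {})
--         node.setdefault("__files__", set()).add(parts[-1])
--
--     lines: List[str] = []
--
--     def recurse(prefix: str, node: Dict[str, Dict], depth: int = 0) -> None:
--         directories = sorted(k for k in node.keys() if k != "__files__")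
--         files = sorted(node.get("__files__", []))
--         indent = "  " * depth
--         for directory in directories:
--             lines.append(f"{indent}{directory}/")
--             recurse(prefix + directory + "/", node[directory], depth + 1)
--         for file in files:
--             lines.append(f"{indent}{file}")
--
--     recurse("", tree, 0)
--     return "\n".join(lines)
--
-- def build_codemap(paths: Sequence[str], hotspots: Sequence[Tuple[str, int]], changes: Sequence[Tuple[str, str]]) -> str:
--     lines = [
--         "# CODEMAP",
--         "## Purpose",
--         "- <Describe the overall goal of this repository>",
--         "## Entrypoints",
--         "- Document CLI or service entrypoints here",
--         "## Modules (high level)",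
--         "- Summarize key modules here",
--         "## Config & Secrets",
--         "- List relevant config files and secret handling",
--         "## Data & Schemas",
--         "- Summarize data locations and schema docs",
--         "## Tests",
--         "- Note how to run test suites",
--         "\n---\n### Auto-generated appendix",
--         "#### Tree (filtered)",
--         "```",
--     ]
--     if paths:
--         tree_preview = build_repo_tree(paths).splitlines()
--         lines.extend(tree_preview[:1000])
--     lines.append("```")
--     lines.append("#### Hotspots")
--     if hotspots:
--         lines.extend(f"- {path} ({count})" for path, count in hotspots)
--     else:
--         lines.append("- (none)")
--     lines.append("#### Changed since base")
--     if changes: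
--         lines.extend(f"- {status}\t{path}" for status, path in changes if path)
--     else:
--         lines.append("- (no tracked changes)")
--     return "\n".join(lines)
--
-- def build_repo_tree(paths: Sequence[str]) -> str:
--     if not paths:
--         return "(repository tree unavailable)"
--     return build_tree(paths)
-- ===== SOURCE B (Python) =====
-- def _emit(partss, depth):
--     # partss: list of non-empty component lists belonging to the current directory
--     indent = "  " * depth
--     dirs = sorted({ps[0] for ps in partss if len(ps) > 1})
--     files = sorted({ps[0] for ps in partss if len(ps) == 1})
--     out = []
--     for d in dirs:
--         out.append(indent + d + "/")
--         out.extend(_emit([ps[1:] for ps in partss if ps[0] == d and len(ps) > 1], depth + 1))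
--     for f in files:
--         out.append(indent + f)
--     return out
--
--
-- def build_codemap(paths, hotspots, changes):
--     header = [
--         "# CODEMAP",
--         "## Purpose",
--         "- <Describe the overall goal of this repository>",
--         "## Entrypoints",
--         "- Document CLI or service entrypoints here",
--         "## Modules (high level)",
--         "- Summarize key modules here",
--         "## Config & Secrets",
--         "- List relevant config files and secret handling",
--         "## Data & Schemas",
--         "- Summarize data locations and schema docs",
--         "## Tests",
--         "- Note how to run test suites",
--         "\n---\n### Auto-generated appendix",
--         "#### Tree (filtered)",
--         "```",
--     ]
--     tree_block = []
--     if paths: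
--         tree_text = "\n".join(_emit([p.split("/") for p in paths], 0))
--         tree_block = tree_text.splitlines()[:1000]
--     hot_block = [f"- {p} ({c})" for p, c in hotspots] if hotspots else ["- (none)"]
--     chg_block = (
--         [f"- {s}\t{p}" for s, p in changes if p]
--         if changes
--         else ["- (no tracked changes)"]
--     )
--     return "\n".join(
--         header
--         + tree_block
--         + ["```", "#### Hotspots"]
--         + hot_block
--         + ["#### Changed since base"]
--         + chg_block
--     )
-- ===== Notes on version B (the rewrite author's own statement) =====
-- stated objective: alternative
-- what changed: B drops A's mutable nested-dict tree (built via setdefault) and its recursive dict-walking emitter, and instead emits the tree by divide-and-conquer directly on the lists of path components: at each level it sorts the distinct heads, recurses on the tails grouped under each directory head, and lists files after subdirectories.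
-- outside the precondition, e.g. on build_codemap(['x/__files__/y', 'x/z'], [], []): A raises AttributeError
import Mathlib
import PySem

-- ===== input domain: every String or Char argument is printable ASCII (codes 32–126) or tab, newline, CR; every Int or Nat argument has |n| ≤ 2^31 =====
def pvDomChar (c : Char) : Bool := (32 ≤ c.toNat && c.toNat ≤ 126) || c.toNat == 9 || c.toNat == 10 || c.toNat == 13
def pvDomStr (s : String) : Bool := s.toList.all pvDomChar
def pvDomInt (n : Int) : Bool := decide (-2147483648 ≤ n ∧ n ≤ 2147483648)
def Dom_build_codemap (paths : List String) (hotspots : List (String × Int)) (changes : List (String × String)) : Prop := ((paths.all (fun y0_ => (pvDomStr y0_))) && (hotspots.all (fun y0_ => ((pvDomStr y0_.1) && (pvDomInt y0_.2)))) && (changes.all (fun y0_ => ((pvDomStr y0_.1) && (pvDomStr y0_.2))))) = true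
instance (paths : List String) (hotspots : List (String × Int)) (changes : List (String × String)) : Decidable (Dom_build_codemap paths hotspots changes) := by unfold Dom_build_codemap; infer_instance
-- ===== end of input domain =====

-- B replaces A's mutable nested-dict tree plus recursive emitter by a direct divide-and-conquer
-- over the lists of path components (group by head, recurse on tails); objective: alternative.

-- "  " * depth (shared by both ports)
def pyIndent : Nat → String
  | 0 => ""
  | n+1 => pyIndent n ++ "  "

-- ===== PORT A =====
-- A's nested dict {name: subdict, "__files__": set}: under Pre_ the "__files__" key only ever
-- holds the file set, so a node is (children assoc-list in insertion order, files set).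
mutual
inductive PNode : Type where
  | mk : PChildren → List String → PNode
inductive PChildren : Type where
  | nil : PChildren
  | cons : String → PNode → PChildren → PChildren
end

def PNode.children : PNode → PChildren
  | .mk ch _ => ch

def PNode.files : PNode → List String
  | .mk _ fs => fs

def childGet? : PChildren → String → Option PNode
  | .nil, _ => none
  | .cons n t rest, k => if n == k then some t else childGet? rest k

-- node.setdefault(k, {}); the default is a totality guard only used where Python creates the entry
def childAtD (ch : PChildren) (k : String) : PNode :=
  (childGet? ch k).getD (PNode.mk PChildren.nil [])

-- overwrite in place, new keys append (dict insertion order)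
def childSet : PChildren → String → PNode → PChildren
  | .nil, k, v => .cons k v .nil
  | .cons n t rest, k, v => if n == k then .cons n v rest else .cons n t (childSet rest k v)

def childNames : PChildren → List String
  | .nil => []
  | .cons n _ rest => n :: childNames rest

-- `node = tree; for part in parts[:-1]: node = node.setdefault(part, {}); node.setdefault("__files__", set()).add(parts[-1])`
-- (parts is never empty: str.split always yields at least one piece; the [] case is unreachable)
def insertPath : PNode → List String → PNode
  | t, [] => t
  | t, [x] => PNode.mk t.children (PySem.Set.add t.files x)
  | t, a :: rest => PNode.mk (childSet t.children a (insertPath (childAtD t.children a) rest)) t.files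

-- `recurse(prefix, node, depth)`; fuel is a totality guard, large enough at the call site
def recurseA : Nat → String → PNode → Nat → List String
  | 0, _, _, _ => []
  | fuel+1, pre, node, depth =>
      ((PySem.List.sorted ((childNames node.children).filter (fun k => !(k == "__files__"))) (fun x => x)).foldl
        (fun acc d => acc ++ [pyIndent depth ++ d ++ "/"]
            ++ recurseA fuel (pre ++ d ++ "/") (childAtD node.children d) (depth+1)) [])
      ++ (PySem.List.sorted node.files (fun x => x)).map (fun f => pyIndent depth ++ f)

def build_tree (paths : List String) : String :=
  PySem.Str.join "\n"
    (recurseA ((paths.map (fun p => (PySem.Str.split? p "/").getD [""])).foldl (fun a ps => a + ps.length) 1)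
      "" (paths.foldl (fun t p => insertPath t ((PySem.Str.split? p "/").getD [""])) (PNode.mk PChildren.nil [])) 0)

def build_repo_tree (paths : List String) : String :=
  if paths.isEmpty then "(repository tree unavailable)" else build_tree paths

def build_codemap (paths : List String) (hotspots : List (String × Int)) (changes : List (String × String)) : String :=
  let lines0 : List String :=
    ["# CODEMAP", "## Purpose", "- <Describe the overall goal of this repository>",
     "## Entrypoints", "- Document CLI or service entrypoints here",
     "## Modules (high level)", "- Summarize key modules here",
     "## Config & Secrets", "- List relevant config files and secret handling",
     "## Data & Schemas", "- Summarize data locations and schema docs",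
     "## Tests", "- Note how to run test suites",
     "\n---\n### Auto-generated appendix", "#### Tree (filtered)", "```"]
  let lines1 := if paths.isEmpty then lines0
    else lines0 ++ PySem.List.slice (PySem.Str.splitlines (build_repo_tree paths)) none (some 1000)
  let lines2 := lines1 ++ ["```"] ++ ["#### Hotspots"]
  let lines3 := if hotspots.isEmpty then lines2 ++ ["- (none)"]
    else lines2 ++ hotspots.map (fun pc => "- " ++ pc.1 ++ " (" ++ PySem.Int.toStr pc.2 ++ ")")
  let lines4 := lines3 ++ ["#### Changed since base"]
  let lines5 := if changes.isEmpty then lines4 ++ ["- (no tracked changes)"]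
    else lines4 ++ (changes.filter (fun sp => !(sp.2 == ""))).map (fun sp => "- " ++ sp.1 ++ "\t" ++ sp.2)
  PySem.Str.join "\n" lines5

-- ===== PORT B =====
-- _emit(partss, depth): group the component lists by head; no intermediate tree
def emitB : Nat → List (List String) → Nat → List String
  | 0, _, _ => []
  | fuel+1, partss, depth =>
      ((PySem.List.sorted (PySem.Set.ofList ((partss.filter (fun ps => decide (1 < ps.length))).map (fun ps => ps.headD ""))) (fun x => x)).foldl
        (fun out d => out ++ [pyIndent depth ++ d ++ "/"]
            ++ emitB fuel ((partss.filter (fun ps => ps.headD "" == d && decide (1 < ps.length))).map (fun ps => ps.drop 1)) (depth+1)) [])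
      ++ (PySem.List.sorted (PySem.Set.ofList ((partss.filter (fun ps => ps.length == 1)).map (fun ps => ps.headD ""))) (fun x => x)).map
          (fun f => pyIndent depth ++ f)

def build_codemap_alt (paths : List String) (hotspots : List (String × Int)) (changes : List (String × String)) : String :=
  let header : List String :=
    ["# CODEMAP", "## Purpose", "- <Describe the overall goal of this repository>",
     "## Entrypoints", "- Document CLI or service entrypoints here",
     "## Modules (high level)", "- Summarize key modules here",
     "## Config & Secrets", "- List relevant config files and secret handling",
     "## Data & Schemas", "- Summarize data locations and schema docs",
     "## Tests", "- Note how to run test suites",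
     "\n---\n### Auto-generated appendix", "#### Tree (filtered)", "```"]
  let tree_block : List String := if paths.isEmpty then []
    else PySem.List.slice (PySem.Str.splitlines (PySem.Str.join "\n"
      (emitB ((paths.map (fun p => (PySem.Str.split? p "/").getD [""])).foldl (fun a ps => a + ps.length) 1)
        (paths.map (fun p => (PySem.Str.split? p "/").getD [""])) 0))) none (some 1000)
  let hot_block := if hotspots.isEmpty then ["- (none)"]
    else hotspots.map (fun pc => "- " ++ pc.1 ++ " (" ++ PySem.Int.toStr pc.2 ++ ")")
  let chg_block := if changes.isEmpty then ["- (no tracked changes)"]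
    else (changes.filter (fun sp => !(sp.2 == ""))).map (fun sp => "- " ++ sp.1 ++ "\t" ++ sp.2)
  PySem.Str.join "\n" (header ++ tree_block ++ ["```", "#### Hotspots"] ++ hot_block
    ++ ["#### Changed since base"] ++ chg_block)

-- ===== PRECONDITION & SPEC =====
-- Pre_ excludes paths using the reserved sentinel name "__files__" as a directory component:
-- there A either raises AttributeError or silently drops the subtree, an artefact of its
-- sentinel-key dict representation.
def Pre_build_codemap (paths : List String) (hotspots : List (String × Int)) (changes : List (String × String)) : Prop :=
  ∀ p ∈ paths, "__files__" ∉ ((PySem.Str.split? p "/").getD [""]).dropLast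
instance (paths : List String) (hotspots : List (String × Int)) (changes : List (String × String)) : Decidable (Pre_build_codemap paths hotspots changes) := by unfold Pre_build_codemap; infer_instance

def pvWitness_build_codemap : List String × (List (String × Int)) × (List (String × String)) :=
  (["src/main.py", "src/util.py", "README.md"], [("src/main.py", 3)], [("M", "src/main.py")])

def Spec_build_codemap (paths : List String) (hotspots : List (String × Int)) (changes : List (String × String)) (out : String) : Prop := out = build_codemap_alt paths hotspots changes
instance (paths : List String) (hotspots : List (String × Int)) (changes : List (String × String)) (out : String) : Decidable (Spec_build_codemap paths hotspots changes out) := by unfold Spec_build_codemap; infer_instance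

-- ===== CLAIM (what is proved, stated in full; the proofs are below) =====
def Claim_equal_build_codemap : Prop := ∀ (paths : List String) (hotspots : List (String × Int)) (changes : List (String × String)), Dom_build_codemap paths hotspots changes → Pre_build_codemap paths hotspots changes → Spec_build_codemap paths hotspots changes (build_codemap paths hotspots changes)

-- ===== LEMMAS AND PROOFS =====

lemma go_ne_nil (sep : List Char) (fuel : Nat) (l cur : List Char) (acc : List (List Char)) :
    PySem.Chars.splitOn.go sep fuel l cur acc ≠ [] := by
  induction fuel generalizing l cur acc with
  | zero => simp [PySem.Chars.splitOn.go]
  | succ n ih =>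
    cases l with
    | nil => simp [PySem.Chars.splitOn.go]
    | cons c rest =>
      rw [PySem.Chars.splitOn.go]
      split_ifs <;> apply ih

lemma splitP_ne_nil (p : String) : (PySem.Str.split? p "/").getD [""] ≠ [] := by
  simp [PySem.Str.split?, PySem.Chars.split?, PySem.Chars.splitOn]
  intro h
  exact go_ne_nil _ _ _ _ _ h

theorem childNames_childSet (ch : PChildren) (k : String) (v : PNode) :
    childNames (childSet ch k v) = PySem.Set.add (childNames ch) k := by
  match ch with
  | .nil => simp [childSet, childNames, PySem.Set.add, PySem.Set.contains]
  | .cons n t rest =>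
    have ih := childNames_childSet rest k v
    by_cases h : n = k
    · simp [childSet, h, childNames, PySem.Set.add, PySem.Set.contains]
    · have h' : ¬ k = n := fun e => h e.symm
      simp [childSet, childNames, h, h', ih, PySem.Set.add, PySem.Set.contains]
      split_ifs <;> simp

theorem childAtD_childSet (ch : PChildren) (k k' : String) (v : PNode) :
    childAtD (childSet ch k v) k' = if k' = k then v else childAtD ch k' := by
  match ch with
  | .nil =>
    by_cases h : k' = k
    · subst h; simp [childSet, childAtD, childGet?]
    · have h2 : (k == k') = false := beq_eq_false_iff_ne.mpr (fun e => h e.symm)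
      simp [childSet, childAtD, childGet?, h, h2]
  | .cons n t rest =>
    have ih := childAtD_childSet rest k k' v
    by_cases hnk : n = k
    · subst hnk
      by_cases h : k' = n
      · subst h; simp [childSet, childAtD, childGet?]
      · have h2 : (n == k') = false := beq_eq_false_iff_ne.mpr (fun e => h e.symm)
        simp [childSet, childAtD, childGet?, h, h2]
    · have h3 : (n == k) = false := beq_eq_false_iff_ne.mpr hnk
      by_cases h : n = k'
      · have h4 : ¬ k' = k := fun e => hnk (h.trans e)
        simp [childSet, childAtD, childGet?, h, h4]
      · have h5 : (n == k') = false := beq_eq_false_iff_ne.mpr h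
        simp only [childSet, h3, Bool.false_eq_true, if_false, childAtD, childGet?, h5]
        simpa [childAtD] using ih

lemma files_fold (L : List (List String)) (t : PNode) :
    (L.foldl insertPath t).files =
      ((L.filter (fun ps => ps.length == 1)).map (fun ps => ps.headD "")).foldl PySem.Set.add t.files := by
  induction L generalizing t with
  | nil => rfl
  | cons ps L ih =>
    match ps with
    | [] => simpa [insertPath] using ih t
    | [x] => simpa [insertPath, PNode.files] using ih (insertPath t [x])
    | a :: b :: rest =>
      have h1 : (insertPath t (a :: b :: rest)).files = t.files := by simp [insertPath, PNode.files]
      simpa [h1, insertPath] using ih (insertPath t (a :: b :: rest))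

lemma names_fold (L : List (List String)) (t : PNode) :
    childNames (L.foldl insertPath t).children =
      ((L.filter (fun ps => decide (1 < ps.length))).map (fun ps => ps.headD "")).foldl PySem.Set.add (childNames t.children) := by
  induction L generalizing t with
  | nil => rfl
  | cons ps L ih =>
    match ps with
    | [] => simpa [insertPath] using ih t
    | [x] => simpa [insertPath, PNode.children] using ih (insertPath t [x])
    | a :: b :: rest =>
      have h1 : childNames (insertPath t (a :: b :: rest)).children
          = PySem.Set.add (childNames t.children) a := by
        simp [insertPath, PNode.children, childNames_childSet]
      simp only [List.foldl_cons, List.filter_cons]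
      simpa [h1] using ih (insertPath t (a :: b :: rest))

lemma child_fold (L : List (List String)) (t : PNode) (d : String) :
    childAtD (L.foldl insertPath t).children d =
      ((L.filter (fun ps => ps.headD "" == d && decide (1 < ps.length))).map (fun ps => ps.drop 1)).foldl
        insertPath (childAtD t.children d) := by
  induction L generalizing t with
  | nil => rfl
  | cons ps L ih =>
    match ps with
    | [] =>
      simp only [List.foldl_cons, List.filter_cons]
      rw [ih (insertPath t [])]
      simp [insertPath]
    | [x] =>
      simp only [List.foldl_cons, List.filter_cons]
      rw [ih (insertPath t [x])]
      simp [insertPath, PNode.children]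
    | a :: b :: rest =>
      simp only [List.foldl_cons, List.filter_cons]
      rw [ih (insertPath t (a :: b :: rest))]
      by_cases h : a = d
      · subst h
        have hc : (((a :: b :: rest) : List String).headD "" == a && decide (1 < ((a :: b :: rest) : List String).length)) = true := by
          simp
        simp only [hc, if_true, List.map_cons, List.foldl_cons, List.drop_succ_cons, List.drop_zero]
        congr 1
        simp [insertPath, PNode.children, childAtD_childSet]
      · have hc : (((a :: b :: rest) : List String).headD "" == d && decide (1 < ((a :: b :: rest) : List String).length)) = false := by
          simp [h]
        simp only [hc, Bool.false_eq_true, if_false]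
        congr 1
        have hd : ¬ d = a := fun e => h e.symm
        simp [insertPath, PNode.children, childAtD_childSet, hd]

lemma emit_eq (fuel : Nat) : ∀ (L : List (List String)) (pre : String) (depth : Nat),
    (∀ ps ∈ L, ps ≠ []) → (∀ ps ∈ L, "__files__" ∉ ps.dropLast) →
    recurseA fuel pre (L.foldl insertPath (PNode.mk PChildren.nil [])) depth = emitB fuel L depth := by
  induction fuel with
  | zero => intros; rfl
  | succ n ih =>
    intro L pre depth hne hpre
    rw [recurseA, emitB]
    have hfiles : (L.foldl insertPath (PNode.mk PChildren.nil [])).files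
        = PySem.Set.ofList ((L.filter (fun ps => ps.length == 1)).map (fun ps => ps.headD "")) := by
      rw [files_fold, PySem.Set.ofList_eq_foldl]; rfl
    have hnames : childNames (L.foldl insertPath (PNode.mk PChildren.nil [])).children
        = PySem.Set.ofList ((L.filter (fun ps => decide (1 < ps.length))).map (fun ps => ps.headD "")) := by
      rw [names_fold, PySem.Set.ofList_eq_foldl]; rfl
    have hfilter : (childNames (L.foldl insertPath (PNode.mk PChildren.nil [])).children).filter
          (fun k => !(k == "__files__"))
        = PySem.Set.ofList ((L.filter (fun ps => decide (1 < ps.length))).map (fun ps => ps.headD "")) := by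
      rw [hnames, List.filter_eq_self]
      intro x hx
      rw [PySem.Set.mem_ofList] at hx
      obtain ⟨ps, hps, hrfl⟩ := List.mem_map.mp hx
      obtain ⟨hpsL, hlen⟩ := List.mem_filter.mp hps
      subst hrfl
      match ps, hpsL, hlen with
      | [], _, hl => simp at hl
      | [y], _, hl => simp at hl
      | a :: b :: rest, hpsL, _ =>
        have ha : a ≠ "__files__" := by
          intro hxe
          exact hpre _ hpsL (by rw [List.dropLast_cons₂, hxe]; exact List.mem_cons_self ..)
        simpa using ha
    rw [hfiles, hfilter]
    congr 1
    apply PySem.List.foldl_congr_mem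
    intro acc d hd
    congr 1
    rw [child_fold]
    have hroot : childAtD (PNode.mk PChildren.nil []).children d = PNode.mk PChildren.nil [] := rfl
    rw [hroot]
    apply ih
    · intro ps hps
      obtain ⟨ps', hps', hrfl⟩ := List.mem_map.mp hps
      obtain ⟨_, hcond⟩ := List.mem_filter.mp hps'
      simp only [Bool.and_eq_true, decide_eq_true_eq] at hcond
      subst hrfl
      match ps', hcond.2 with
      | a :: b :: rest, _ => simp
    · intro ps hps
      obtain ⟨ps', hps', hrfl⟩ := List.mem_map.mp hps
      obtain ⟨hmem, hcond⟩ := List.mem_filter.mp hps'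
      simp only [Bool.and_eq_true, decide_eq_true_eq] at hcond
      subst hrfl
      have hfull := hpre _ hmem
      match ps', hcond.2, hfull with
      | a :: b :: rest, _, hfull =>
        rw [List.dropLast_cons₂] at hfull
        simp only [List.drop_one, List.tail_cons]
        intro hmem'
        exact hfull (List.mem_cons_of_mem _ (by simpa using hmem'))

lemma tree_eq (paths : List String) (hpre : ∀ p ∈ paths, "__files__" ∉ ((PySem.Str.split? p "/").getD [""]).dropLast) :
    build_tree paths
      = PySem.Str.join "\n"
          (emitB ((paths.map (fun p => (PySem.Str.split? p "/").getD [""])).foldl (fun a ps => a + ps.length) 1)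
            (paths.map (fun p => (PySem.Str.split? p "/").getD [""])) 0) := by
  unfold build_tree
  congr 1
  rw [← List.foldl_map (f := fun p => (PySem.Str.split? p "/").getD [""]) (g := insertPath)]
  apply emit_eq
  · intro ps hps
    obtain ⟨p, _, hrfl⟩ := List.mem_map.mp hps
    subst hrfl; exact splitP_ne_nil p
  · intro ps hps
    obtain ⟨p, hp, hrfl⟩ := List.mem_map.mp hps
    subst hrfl; exact hpre p hp

-- ===== VERDICT (by name: the statement is the Claim_ definition above) =====
theorem build_codemap_spec : Claim_equal_build_codemap := by
  intro paths hotspots changes _ hpre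
  unfold Spec_build_codemap build_codemap build_codemap_alt build_repo_tree
  by_cases hp : paths.isEmpty <;>
    by_cases hh : hotspots.isEmpty <;>
      by_cases hc : changes.isEmpty <;>
        simp [hp, hh, hc, tree_eq paths hpre]
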